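-- pv_equiv track=rewrite | github.com/lansqe/My_work_table | function/space.py | any_duplicated
-- ===== SOURCE A (Python) =====
-- def any_duplicated(num: list[list[int]]) -> bool:
--
--     seen = set()
--
--     for sublist in num:
--         for number in sublist:
--             if number in seen:
--                 return True
--             seen.add(number)
--     return False
-- ===== SOURCE B (Python) =====
-- def any_duplicated(num: list[list[int]]) -> bool:
--     flat = sorted(n for sub in num for n in sub)
--     return any(a == b for a, b in zip(flat, flat[1:]))
-- ===== Notes on version B (the rewrite author's own statement) =====
-- stated objective: alternative
-- what changed: Replaces the hash-set membership scan with a sort of the flattened values followed by an adjacent-pair equality scan (duplicates in a sorted list are always adjacent); no set is used at all.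
import Mathlib
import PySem

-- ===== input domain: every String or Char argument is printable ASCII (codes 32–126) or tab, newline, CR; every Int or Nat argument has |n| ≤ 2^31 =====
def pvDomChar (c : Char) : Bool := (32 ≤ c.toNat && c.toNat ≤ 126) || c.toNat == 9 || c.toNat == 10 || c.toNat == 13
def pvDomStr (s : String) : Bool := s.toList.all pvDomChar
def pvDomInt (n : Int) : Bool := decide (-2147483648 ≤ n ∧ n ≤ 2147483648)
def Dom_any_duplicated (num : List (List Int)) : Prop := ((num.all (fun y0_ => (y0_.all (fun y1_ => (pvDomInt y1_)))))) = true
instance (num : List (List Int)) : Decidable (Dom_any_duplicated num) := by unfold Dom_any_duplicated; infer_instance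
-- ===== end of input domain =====

-- B replaces A's hash-set membership scan by sorting the flattened values and scanning
-- adjacent pairs for equality (objective: alternative; no set at all).

-- ===== PORT A =====
-- inner 'for number in sublist' loop: none = 'return True' fired, some seen' = loop finished
def anyDupInner (seen : PySem.Set Int) : List Int → Option (PySem.Set Int)
  | [] => some seen
  | n :: t => if PySem.Set.contains seen n then none else anyDupInner (PySem.Set.add seen n) t

-- outer 'for sublist in num' loop
def anyDupOuter (seen : PySem.Set Int) : List (List Int) → Bool
  | [] => false
  | s :: t =>
    match anyDupInner seen s with
    | none => true
    | some seen' => anyDupOuter seen' t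

def any_duplicated (num : List (List Int)) : Bool :=
  anyDupOuter PySem.Set.empty num

-- ===== PORT B =====
def any_duplicated_alt (num : List (List Int)) : Bool :=
  let flat := PySem.List.sorted (num.flatMap (fun sub => sub)) (fun x => x) false
  (flat.zip flat.tail).any (fun p => p.1 == p.2)

-- ===== PRECONDITION & SPEC =====
def Spec_any_duplicated (num : List (List Int)) (out : Bool) : Prop := out = any_duplicated_alt num
instance (num : List (List Int)) (out : Bool) : Decidable (Spec_any_duplicated num out) := by unfold Spec_any_duplicated; infer_instance

-- ===== CLAIM (what is proved, stated in full; the proofs are below) =====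
def Claim_equal_any_duplicated : Prop := ∀ (num : List (List Int)), Dom_any_duplicated num → Spec_any_duplicated num (any_duplicated num)

-- ===== LEMMAS AND PROOFS =====

theorem anyDupInner_spec (xs : List Int) : ∀ (seen : List Int), seen.Nodup →
    (if (seen ++ xs).Nodup then anyDupInner seen xs = some (seen ++ xs)
     else anyDupInner seen xs = none) := by
  induction xs with
  | nil => intro seen h; simp [anyDupInner, h]
  | cons n t ih =>
    intro seen h
    by_cases hn : n ∈ seen
    · have : ¬ (seen ++ n :: t).Nodup := by
        intro hnd
        exact (List.disjoint_of_nodup_append hnd) hn (by simp)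
      simp [anyDupInner, this, PySem.Set.contains, hn]
    · have hadd : PySem.Set.add seen n = seen ++ [n] := by
        simp [PySem.Set.add, PySem.Set.contains, hn]
      have hnd : (seen ++ [n]).Nodup := by
        simp [List.nodup_append, h]
        exact fun a ha he => hn (he ▸ ha)
      have := ih (seen ++ [n]) hnd
      simp only [List.append_assoc, List.singleton_append] at this
      simpa [anyDupInner, PySem.Set.contains, hn, hadd] using this

theorem anyDupOuter_spec (l : List (List Int)) : ∀ (seen : List Int), seen.Nodup →
    anyDupOuter seen l = !decide ((seen ++ l.flatMap (fun sub => sub)).Nodup) := by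
  induction l with
  | nil => intro seen h; simp [anyDupOuter, h]
  | cons s t ih =>
    intro seen h
    have hin := anyDupInner_spec s seen h
    by_cases hnd : (seen ++ s).Nodup
    · rw [if_pos hnd] at hin
      have := ih (seen ++ s) hnd
      simp [anyDupOuter, hin, this, List.flatMap_cons, List.append_assoc]
    · rw [if_neg hnd] at hin
      have hx : ¬ (seen ++ (s ++ t.flatten)).Nodup := by
        intro hall
        exact hnd (hall.sublist (by
          rw [← List.append_assoc]
          exact List.sublist_append_left _ _))
      simp [anyDupOuter, hin, hx]

-- on a ≤-sorted list, an adjacent equal pair exists iff the list is not Nodup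
theorem adj_eq_of_pairwise (s : List Int) (hp : s.Pairwise (· ≤ ·)) :
    ((s.zip s.tail).any (fun p => p.1 == p.2)) = !decide s.Nodup := by
  induction s with
  | nil => simp
  | cons a t ih =>
    cases t with
    | nil => simp
    | cons b u =>
      rcases List.pairwise_cons.mp hp with ⟨hab, hp'⟩
      by_cases he : a = b
      · subst he
        have : ¬ (a :: a :: u).Nodup := by simp
        simp [this]
      · have hlt : a < b := lt_of_le_of_ne (hab b (by simp)) he
        have hna : a ∉ b :: u := by
          intro hmem
          rcases List.mem_cons.mp hmem with h1 | h1
          · exact he h1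
          · have := (List.pairwise_cons.mp hp').1 a h1
            omega
        have hnd : (a :: b :: u).Nodup ↔ (b :: u).Nodup := by
          simp [List.nodup_cons, hna]
        have := ih hp'
        by_cases h2 : (b :: u).Nodup
        · simp [List.zip, he, hnd.mpr h2]
          simpa [h2, List.zip] using this
        · have hthis : ((List.zipWith Prod.mk (b :: u) u).any fun p => p.1 == p.2) = true := by
            simpa [h2, List.zip] using this
          have h2' : b ∈ u ∨ ¬ u.Nodup := by
            by_contra hc
            push_neg at hc
            exact h2 (List.nodup_cons.mpr ⟨hc.1, hc.2⟩)
          rcases h2' with h | h <;> simp [List.zip, hthis, h]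

-- ===== VERDICT (by name: the statement is the Claim_ definition above) =====
theorem any_duplicated_spec : Claim_equal_any_duplicated := by
  intro num _
  unfold Spec_any_duplicated any_duplicated_alt
  set flat0 := num.flatMap (fun sub => sub) with hf
  set s := PySem.List.sorted flat0 (fun x => x) false with hs
  have hperm : s.Perm flat0 := PySem.List.sorted_perm _ _ _
  have hpair : s.Pairwise (fun a b => a ≤ b) := by
    simpa using PySem.List.sorted_pairwise (xs := flat0) (key := fun x => x)
  have hA := anyDupOuter_spec num [] (by simp)
  have hnd : s.Nodup ↔ flat0.Nodup := hperm.nodup_iff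
  rw [adj_eq_of_pairwise s hpair]
  simp only [any_duplicated, PySem.Set.empty] at *
  rw [hA]
  simp [hnd, hf, List.flatMap_id']
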